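-- pv_equiv track=rewrite | github.com/Bishibop/slatec90 | tools/compress_test_cases.py | compress_test_cases
-- ===== SOURCE A (Python) =====
-- def compress_test_cases(test_content, max_tests=15):
--     """
--     Compress test cases to the most relevant ones
--     """
--     # Parse test cases
--     tests = []
--     current_test = None
--
--     for line in test_content.splitlines():
--         if line.strip() == 'TEST_START':
--             current_test = {'lines': [line]}
--         elif line.strip() == 'TEST_END':
--             if current_test:
--                 current_test['lines'].append(line)
--                 tests.append(current_test)
--                 current_test = None
--         elif current_test:
--             current_test['lines'].append(line)
--             # Extract description
--             if line.startswith('Description:'):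
--                 current_test['description'] = line
--             # Extract parameter values
--             elif 'PARAMS:' in line:
--                 current_test['params'] = line
--
--     # Categorize tests
--     error_tests = []
--     boundary_tests = []
--     special_tests = []
--     regular_tests = []
--
--     for test in tests:
--         desc = test.get('description', '').lower()
--         params = test.get('params', '')
--
--         # Priority 1: Error cases
--         if any(word in desc for word in ['error', 'negative', 'zero input', 'invalid', 'fail']):
--             error_tests.append(test)
--         # Priority 2: Boundary cases
--         elif any(word in desc for word in ['boundary', 'edge', 'limit', 'overflow', 'underflow', 'tiny', 'huge', 'epsilon']):
--             boundary_tests.append(test)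
--         # Priority 3: Special values
--         elif any(word in desc for word in ['special', 'exact', 'integer', 'pi', 'inf', 'nan']):
--             special_tests.append(test)
--         else:
--             regular_tests.append(test)
--
--     # Build compressed test set
--     compressed = []
--
--     # Always include error tests (usually 2-3)
--     compressed.extend(error_tests[:3])
--
--     # Include key boundary tests (3-4)
--     compressed.extend(boundary_tests[:4])
--
--     # Include special value tests (2-3)
--     compressed.extend(special_tests[:3])
--
--     # Fill remaining slots with regular tests
--     remaining_slots = max_tests - len(compressed)
--     if remaining_slots > 0 and regular_tests:
--         # Sample evenly from regular tests
--         step = max(1, len(regular_tests) // remaining_slots)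
--         compressed.extend(regular_tests[::step][:remaining_slots])
--
--     # Reconstruct test content
--     result_lines = [f'FUNCTION: {test_content.splitlines()[0].split(":")[1].strip()}', '']
--
--     for i, test in enumerate(compressed, 1):
--         result_lines.extend(test['lines'])
--         result_lines.append('')
--
--     # Add summary comment
--     result_lines.append(f'# Compressed from {len(tests)} to {len(compressed)} tests')
--     result_lines.append(f'# Categories: {len(error_tests)} error, {len(boundary_tests)} boundary, {len(special_tests)} special')
--
--     return '\n'.join(result_lines)
-- ===== SOURCE B (Python) =====
-- ERROR_WORDS = ['error', 'negative', 'zero input', 'invalid', 'fail']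
-- BOUNDARY_WORDS = ['boundary', 'edge', 'limit', 'overflow', 'underflow', 'tiny', 'huge', 'epsilon']
-- SPECIAL_WORDS = ['special', 'exact', 'integer', 'pi', 'inf', 'nan']
--
--
-- def _category(block):
--     """Category of a block, reading its description by a back-to-front search
--     of the block's interior lines (the last Description: line wins)."""
--     desc = ''
--     for l in reversed(block[1:-1]):
--         if l.startswith('Description:'):
--             desc = l
--             break
--     d = desc.lower()
--     if any(w in d for w in ERROR_WORDS):
--         return 0
--     if any(w in d for w in BOUNDARY_WORDS):
--         return 1
--     if any(w in d for w in SPECIAL_WORDS):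
--         return 2
--     return 3
--
--
-- def compress_test_cases(test_content, max_tests=15):
--     """Two-pointer variant: cut the line list into TEST_START..TEST_END slices
--     by scanning ahead for the next marker, instead of a line-by-line state
--     machine; the description is then recovered from each finished slice by a
--     backwards search, and the buckets are filter comprehensions."""
--     lines = test_content.splitlines()
--     n = len(lines)
--
--     blocks = []
--     i = 0
--     while i < n:
--         if lines[i].strip() != 'TEST_START':
--             i += 1
--             continue
--         j = i + 1
--         while j < n and lines[j].strip() not in ('TEST_START', 'TEST_END'):
--             j += 1
--         if j == n:
--             break
--         if lines[j].strip() == 'TEST_END':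
--             blocks.append(lines[i:j + 1])
--             i = j + 1
--         else:
--             i = j
--
--     tagged = [(_category(b), b) for b in blocks]
--     err = [b for c, b in tagged if c == 0]
--     bnd = [b for c, b in tagged if c == 1]
--     spc = [b for c, b in tagged if c == 2]
--     reg = [b for c, b in tagged if c == 3]
--
--     compressed = err[:3] + bnd[:4] + spc[:3]
--     remaining = max_tests - len(compressed)
--     if remaining > 0 and reg:
--         step = max(1, len(reg) // remaining)
--         compressed += reg[::step][:remaining]
--
--     body = [l for b in compressed for l in b + ['']]
--     return '\n'.join(
--         ['FUNCTION: ' + lines[0].split(':')[1].strip(), ''] + body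
--         + ['# Compressed from {} to {} tests'.format(len(blocks), len(compressed)),
--            '# Categories: {} error, {} boundary, {} special'.format(len(err), len(bnd), len(spc))])
-- ===== Notes on version B (the rewrite author's own statement) =====
-- stated objective: alternative
-- what changed: A is a line-by-line state machine that carries a current-test dict and then re-iterates the parsed tests to categorize; B is a two-pointer scan that cuts the line list into TEST_START..TEST_END slices by scanning ahead for the next marker, recovers each description afterwards by a backwards search of the slice interior, and builds the four buckets as filter comprehensions over (category, block) tags.
import Mathlib
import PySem

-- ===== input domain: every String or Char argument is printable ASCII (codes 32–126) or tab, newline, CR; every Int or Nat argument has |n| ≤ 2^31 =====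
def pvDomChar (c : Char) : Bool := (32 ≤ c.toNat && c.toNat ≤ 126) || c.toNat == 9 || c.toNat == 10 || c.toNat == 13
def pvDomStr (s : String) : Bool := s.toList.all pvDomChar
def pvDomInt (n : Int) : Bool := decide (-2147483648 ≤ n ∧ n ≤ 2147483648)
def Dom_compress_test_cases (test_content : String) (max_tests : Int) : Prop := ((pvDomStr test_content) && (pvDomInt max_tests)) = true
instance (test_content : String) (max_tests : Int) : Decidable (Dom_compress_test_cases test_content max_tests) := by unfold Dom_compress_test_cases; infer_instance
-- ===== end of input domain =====

-- B replaces A's line-by-line state machine (current-test dict, then a second categorization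
-- pass) by a two-pointer scan cutting the line list into marker-delimited slices, a backwards
-- search of each slice for its description, and filter comprehensions for the buckets;
-- return values proved equal on Pre_.

-- ===== PORT A =====

def pvErrorWords : List String := ["error", "negative", "zero input", "invalid", "fail"]
def pvBoundaryWords : List String := ["boundary", "edge", "limit", "overflow", "underflow", "tiny", "huge", "epsilon"]
def pvSpecialWords : List String := ["special", "exact", "integer", "pi", "inf", "nan"]

structure PvATest where
  lines : List String
  desc : Option String
  params : Option String

def pvAParse (st : List PvATest × Option PvATest) (line : String) : List PvATest × Option PvATest :=
  if PySem.Str.strip line == "TEST_START" then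
    (st.1, some ⟨[line], none, none⟩)
  else if PySem.Str.strip line == "TEST_END" then
    match st.2 with
    | some t => (st.1 ++ [{ t with lines := t.lines ++ [line] }], none)
    | none => st
  else
    match st.2 with
    | some t =>
      if PySem.Str.startswith line "Description:" then
        (st.1, some ⟨t.lines ++ [line], some line, t.params⟩)
      else if PySem.Str.isIn "PARAMS:" line then
        (st.1, some ⟨t.lines ++ [line], t.desc, some line⟩)
      else (st.1, some ⟨t.lines ++ [line], t.desc, t.params⟩)
    | none => st

def pvACat (st : List PvATest × List PvATest × List PvATest × List PvATest) (t : PvATest) :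
    List PvATest × List PvATest × List PvATest × List PvATest :=
  if pvErrorWords.any (fun w => PySem.Str.isIn w (PySem.Str.lower (t.desc.getD ""))) then
    (st.1 ++ [t], st.2.1, st.2.2.1, st.2.2.2)
  else if pvBoundaryWords.any (fun w => PySem.Str.isIn w (PySem.Str.lower (t.desc.getD ""))) then
    (st.1, st.2.1 ++ [t], st.2.2.1, st.2.2.2)
  else if pvSpecialWords.any (fun w => PySem.Str.isIn w (PySem.Str.lower (t.desc.getD ""))) then
    (st.1, st.2.1, st.2.2.1 ++ [t], st.2.2.2)
  else (st.1, st.2.1, st.2.2.1, st.2.2.2 ++ [t])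

def compress_test_cases (test_content : String) (max_tests : Int) : String :=
  let tests := ((PySem.Str.splitlines test_content).foldl pvAParse ([], none)).1
  let cat := tests.foldl pvACat ([], [], [], [])
  let error_tests := cat.1
  let boundary_tests := cat.2.1
  let special_tests := cat.2.2.1
  let regular_tests := cat.2.2.2
  let compressed := PySem.List.slice error_tests none (some 3) ++
    PySem.List.slice boundary_tests none (some 4) ++ PySem.List.slice special_tests none (some 3)
  let remaining_slots : Int := max_tests - (compressed.length : Int)
  let compressed :=
    if remaining_slots > 0 ∧ regular_tests ≠ [] then
      let step := max 1 (PySem.Int.floordiv (regular_tests.length : Int) remaining_slots)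
      -- step ≥ 1 ≠ 0, so regular_tests[::step] never raises; getD's default is unreachable
      compressed ++ PySem.List.slice ((PySem.List.slice? regular_tests none none step).getD []) none (some remaining_slots)
    else compressed
  -- test_content.splitlines()[0].split(":")[1]: Pre_ excludes the IndexErrors (both pyGet? none)
  let header := PySem.Str.strip ((PySem.List.pyGet?
    ((PySem.Str.split? ((PySem.List.pyGet? (PySem.Str.splitlines test_content) 0).getD "") ":").getD []) 1).getD "")
  let result_lines : List String := ["FUNCTION: " ++ header, ""]
  let result_lines := compressed.foldl (fun acc t => acc ++ t.lines ++ [""]) result_lines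
  let result_lines := result_lines ++
    ["# Compressed from " ++ PySem.Int.toStr (tests.length : Int) ++ " to " ++ PySem.Int.toStr (compressed.length : Int) ++ " tests",
     "# Categories: " ++ PySem.Int.toStr (error_tests.length : Int) ++ " error, " ++ PySem.Int.toStr (boundary_tests.length : Int) ++ " boundary, " ++ PySem.Int.toStr (special_tests.length : Int) ++ " special"]
  PySem.Str.join "\n" result_lines

-- ===== PORT B =====

-- inner while loop: first index ≥ j whose line strips to a marker, else len(lines)
def pvScanB (lines : List String) (j : Nat) : Nat :=
  if _h : j < lines.length then
    if !(PySem.Str.strip (lines.getD j "") == "TEST_START"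
         || PySem.Str.strip (lines.getD j "") == "TEST_END") then
      pvScanB lines (j + 1)
    else j
  else j
termination_by lines.length - j

-- needed by pvOuterB's termination proof
theorem pvScanB_ge (lines : List String) (j : Nat) : j ≤ pvScanB lines j := by
  fun_induction pvScanB lines j <;> omega

-- outer while loop: collect the TEST_START..TEST_END slices
def pvOuterB (lines : List String) (i : Nat) (blocks : List (List String)) : List (List String) :=
  if _h : i < lines.length then
    if PySem.Str.strip (lines.getD i "") != "TEST_START" then
      pvOuterB lines (i + 1) blocks
    else
      let j := pvScanB lines (i + 1)
      if j = lines.length then blocks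
      else if PySem.Str.strip (lines.getD j "") == "TEST_END" then
        pvOuterB lines (j + 1) (blocks ++ [PySem.List.slice lines (some (i : Int)) (some ((j + 1 : Nat) : Int))])
      else pvOuterB lines j blocks
  else blocks
termination_by lines.length - i
decreasing_by
  · omega
  · have := pvScanB_ge lines (i + 1); omega
  · have := pvScanB_ge lines (i + 1); omega

-- _category: backwards search of block[1:-1] for the last Description: line, then the keyword chain
def pvCategory (block : List String) : Int :=
  let desc := ((PySem.List.slice block (some 1) (some (-1))).reverse.find?
    (fun l => PySem.Str.startswith l "Description:")).getD ""
  let d := PySem.Str.lower desc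
  if pvErrorWords.any (fun w => PySem.Str.isIn w d) then 0
  else if pvBoundaryWords.any (fun w => PySem.Str.isIn w d) then 1
  else if pvSpecialWords.any (fun w => PySem.Str.isIn w d) then 2
  else 3

def compress_test_cases_alt (test_content : String) (max_tests : Int) : String :=
  let lines := PySem.Str.splitlines test_content
  let blocks := pvOuterB lines 0 []
  let tagged := blocks.map (fun b => (pvCategory b, b))
  let err := (tagged.filter (fun cb => cb.1 == 0)).map (·.2)
  let bnd := (tagged.filter (fun cb => cb.1 == 1)).map (·.2)
  let spc := (tagged.filter (fun cb => cb.1 == 2)).map (·.2)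
  let reg := (tagged.filter (fun cb => cb.1 == 3)).map (·.2)
  let compressed := PySem.List.slice err none (some 3) ++
    PySem.List.slice bnd none (some 4) ++ PySem.List.slice spc none (some 3)
  let remaining : Int := max_tests - (compressed.length : Int)
  let compressed :=
    if remaining > 0 ∧ reg ≠ [] then
      let step := max 1 (PySem.Int.floordiv (reg.length : Int) remaining)
      compressed ++ PySem.List.slice ((PySem.List.slice? reg none none step).getD []) none (some remaining)
    else compressed
  let body := compressed.flatMap (fun b => b ++ [""])
  PySem.Str.join "\n"
    (["FUNCTION: " ++ PySem.Str.strip ((PySem.List.pyGet?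
        ((PySem.Str.split? ((PySem.List.pyGet? lines 0).getD "") ":").getD []) 1).getD ""), ""]
      ++ body
      ++ ["# Compressed from " ++ PySem.Int.toStr (blocks.length : Int) ++ " to " ++ PySem.Int.toStr (compressed.length : Int) ++ " tests",
          "# Categories: " ++ PySem.Int.toStr (err.length : Int) ++ " error, " ++ PySem.Int.toStr (bnd.length : Int) ++ " boundary, " ++ PySem.Int.toStr (spc.length : Int) ++ " special"])

-- ===== PRECONDITION & SPEC =====
-- Pre_ excludes exactly the inputs where A raises IndexError: empty content (splitlines()[0])
-- and a first line with no colon separator (split produces a single piece, so index 1 fails).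
def Pre_compress_test_cases (test_content : String) (max_tests : Int) : Prop :=
  PySem.Str.splitlines test_content ≠ [] ∧
  PySem.Str.isIn ":" ((PySem.Str.splitlines test_content).headD "") = true
instance (test_content : String) (max_tests : Int) : Decidable (Pre_compress_test_cases test_content max_tests) := by
  unfold Pre_compress_test_cases; infer_instance

def pvWitness_compress_test_cases : String × Int :=
  ("FUNCTION: f\nTEST_START\nDescription: error case\nTEST_END\nTEST_START\nDescription: ok\nTEST_END", 15)

def Spec_compress_test_cases (test_content : String) (max_tests : Int) (out : String) : Prop := out = compress_test_cases_alt test_content max_tests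
instance (test_content : String) (max_tests : Int) (out : String) : Decidable (Spec_compress_test_cases test_content max_tests out) := by unfold Spec_compress_test_cases; infer_instance

-- ===== CLAIM (what is proved, stated in full; the proofs are below) =====
def Claim_equal_compress_test_cases : Prop := ∀ (test_content : String) (max_tests : Int), Dom_compress_test_cases test_content max_tests → Pre_compress_test_cases test_content max_tests → Spec_compress_test_cases test_content max_tests (compress_test_cases test_content max_tests)

-- ===== LEMMAS AND PROOFS =====

def pvIsDesc (l : String) : Bool := PySem.Str.startswith l "Description:"

def pvProj (t : PvATest) : List String × String := (t.lines, t.desc.getD "")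

-- the description a forward accumulation has seen so far, read off the accumulated block
def pvDescAcc (acc : List String) : String := (acc.tail.reverse.find? pvIsDesc).getD ""

-- the description B recovers from a finished block
def pvDescB (b : List String) : String :=
  ((PySem.List.slice b (some 1) (some (-1))).reverse.find? pvIsDesc).getD ""

def pvTagB (bs : List (List String)) : List (List String × String) :=
  bs.map (fun b => (b, pvDescB b))

-- what B's scan produces from index i while inside a test accumulated as acc
def pvQrhs (lines : List String) (i : Nat) (acc : List String) : List (List String × String) :=
  let j := pvScanB lines i
  if j = lines.length then []
  else if PySem.Str.strip (lines.getD j "") == "TEST_END" then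
    (acc ++ (lines.drop i).take (j - i) ++ [lines.getD j ""],
     pvDescAcc (acc ++ (lines.drop i).take (j - i)))
      :: pvTagB (pvOuterB lines (j + 1) [])
  else pvTagB (pvOuterB lines j [])

theorem pvDescB_eq (acc : List String) (h : acc ≠ []) (e : String) :
    pvDescB (acc ++ [e]) = pvDescAcc acc := by
  obtain ⟨a, as, rfl⟩ := List.exists_cons_of_ne_nil h
  simp [pvDescB, pvDescAcc, PySem.List.slice, List.take_left']

theorem pvScanB_le (lines : List String) (j : Nat) :
    j ≤ lines.length → pvScanB lines j ≤ lines.length := by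
  fun_induction pvScanB lines j <;> intro hj <;> omega

theorem pvScanB_marker (lines : List String) (j : Nat)
    (hm : (PySem.Str.strip (lines.getD j "") == "TEST_START"
           || PySem.Str.strip (lines.getD j "") == "TEST_END") = true) :
    pvScanB lines j = j := by
  rw [pvScanB]
  by_cases h : j < lines.length
  · simp [h] at hm
    rcases hm with h1 | h1 <;> simp [h, h1]
  · simp [h]

theorem pvScanB_step (lines : List String) (j : Nat) (h : j < lines.length)
    (hm : (PySem.Str.strip (lines.getD j "") == "TEST_START"
           || PySem.Str.strip (lines.getD j "") == "TEST_END") = false) :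
    pvScanB lines j = pvScanB lines (j + 1) := by
  rw [pvScanB]
  simp [h] at hm
  simp [h, hm.1, hm.2]

theorem pvOuterB_acc (lines : List String) :
    ∀ (m i : Nat) (blocks : List (List String)), lines.length - i = m →
    pvOuterB lines i blocks = blocks ++ pvOuterB lines i [] := by
  intro m
  induction m using Nat.strong_induction_on with
  | _ m ih =>
    intro i blocks hm
    rw [pvOuterB]
    conv_rhs => rw [pvOuterB]
    by_cases h : i < lines.length
    · have hge := pvScanB_ge lines (i + 1)
      by_cases hs : (PySem.Str.strip (lines.getD i "") != "TEST_START") = true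
      · simp only [h, dite_true, hs, if_true]
        exact ih (lines.length - (i + 1)) (by omega) (i + 1) blocks rfl
      · simp only [h, dite_true, Bool.not_eq_true] at hs
        simp only [h, dite_true, hs, Bool.false_eq_true, if_false]
        by_cases hj : pvScanB lines (i + 1) = lines.length
        · simp [hj]
        · simp only [hj, if_false]
          by_cases he : (PySem.Str.strip (lines.getD (pvScanB lines (i + 1)) "") == "TEST_END") = true
          · simp only [he, if_true]
            rw [ih (lines.length - (pvScanB lines (i + 1) + 1)) (by omega) _ _ rfl,
                ih (lines.length - (pvScanB lines (i + 1) + 1)) (by omega) (pvScanB lines (i + 1) + 1)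
                  ([] ++ [PySem.List.slice lines (some (i : Int)) (some ((pvScanB lines (i + 1) + 1 : Nat) : Int))]) rfl]
            simp
          · simp only [he, Bool.false_eq_true, if_false]
            exact ih (lines.length - pvScanB lines (i + 1)) (by omega) _ blocks rfl
    · simp [h]

theorem pvDescAcc_append (acc : List String) (h : acc ≠ []) (l : String) :
    pvDescAcc (acc ++ [l]) = if pvIsDesc l = true then l else pvDescAcc acc := by
  obtain ⟨a, as, rfl⟩ := List.exists_cons_of_ne_nil h
  by_cases hl : pvIsDesc l = true <;>
    simp [pvDescAcc, List.find?_cons, hl]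

-- unfolding of B's outer loop at a TEST_START line, in terms of pvQrhs
theorem pvL4 (lines : List String) (i : Nat) (h : i < lines.length)
    (hs : (PySem.Str.strip (lines.getD i "") == "TEST_START") = true) :
    pvTagB (pvOuterB lines i []) = pvQrhs lines (i + 1) [lines.getD i ""] := by
  have hge := pvScanB_ge lines (i + 1)
  have hle := pvScanB_le lines (i + 1) (by omega)
  rw [pvOuterB]
  unfold pvQrhs
  have hbne : (PySem.Str.strip (lines.getD i "") != "TEST_START") = false := by
    simp only [bne, hs, Bool.not_true]
  simp only [h, dite_true, hbne, Bool.false_eq_true, if_false]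
  by_cases hj : pvScanB lines (i + 1) = lines.length
  · simp [hj, pvTagB]
  · simp only [hj, if_false]
    have hjlt : pvScanB lines (i + 1) < lines.length := by omega
    by_cases he : (PySem.Str.strip (lines.getD (pvScanB lines (i + 1)) "") == "TEST_END") = true
    · simp only [he, if_true]
      rw [pvOuterB_acc lines (lines.length - (pvScanB lines (i + 1) + 1)) _ _ rfl]
      set j := pvScanB lines (i + 1) with hjdef
      have hgd : lines.getD i "" = lines[i] := List.getD_eq_getElem lines "" h
      have hgdj : lines.getD j "" = lines[j] := List.getD_eq_getElem lines "" hjlt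
      rw [hgd, hgdj]
      have hslice : PySem.List.slice lines (some (i : Int)) (some ((j + 1 : Nat) : Int))
          = (lines[i] :: (lines.drop (i + 1)).take (j - (i + 1))) ++ [lines[j]] := by
        rw [PySem.List.slice_natCast]
        rw [List.drop_eq_getElem_cons h]
        have h1 : j + 1 - i = (j - i) + 1 := by omega
        rw [h1, List.take_succ_cons]
        have h2 : j - i = (j - (i + 1)) + 1 := by omega
        rw [h2, List.take_add_one]
        have h3 : (lines.drop (i + 1))[j - (i + 1)]? = some lines[j] := by
          rw [List.getElem?_drop]
          have h4 : i + 1 + (j - (i + 1)) = j := by omega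
          rw [h4, List.getElem?_eq_getElem hjlt]
        rw [h3]
        simp
      rw [hslice]
      simp only [pvTagB, List.map_append, List.map_cons, List.map_nil,
        List.singleton_append, List.nil_append]
      congr 1
      rw [pvDescB_eq (lines[i] :: (lines.drop (i + 1)).take (j - (i + 1))) (by simp) lines[j]]
    · simp only [he, Bool.false_eq_true, if_false]

-- stepping pvQrhs over a non-marker line: the scan-ahead absorbs it into the accumulator
theorem pvQrhs_step (lines : List String) (i : Nat) (acc : List String) (h : i < lines.length)
    (hm : (PySem.Str.strip (lines.getD i "") == "TEST_START"
           || PySem.Str.strip (lines.getD i "") == "TEST_END") = false) :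
    pvQrhs lines i acc = pvQrhs lines (i + 1) (acc ++ [lines.getD i ""]) := by
  unfold pvQrhs
  rw [pvScanB_step lines i h hm]
  set j := pvScanB lines (i + 1) with hjdef
  have hge := pvScanB_ge lines (i + 1)
  by_cases hj : j = lines.length
  · simp [hj]
  · simp only [hj, if_false]
    by_cases he : (PySem.Str.strip (lines.getD j "") == "TEST_END") = true
    · simp only [he, if_true]
      have hseg : (lines.drop i).take (j - i)
          = lines.getD i "" :: (lines.drop (i + 1)).take (j - (i + 1)) := by
        rw [List.drop_eq_getElem_cons h]
        have h1 : j - i = (j - (i + 1)) + 1 := by omega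
        rw [h1, List.take_succ_cons, List.getD_eq_getElem lines "" h]
      rw [hseg]
      simp
    · simp only [he, Bool.false_eq_true, if_false]

theorem pvQrhs_start (lines : List String) (i : Nat) (acc : List String) (h : i < lines.length)
    (hS : (PySem.Str.strip (lines.getD i "") == "TEST_START") = true) :
    pvQrhs lines i acc = pvTagB (pvOuterB lines i []) := by
  unfold pvQrhs
  rw [pvScanB_marker lines i (by rw [Bool.or_eq_true]; exact Or.inl hS)]
  have hne : (PySem.Str.strip (lines.getD i "") == "TEST_END") = false := by
    rw [eq_of_beq hS]; decide
  simp only [Nat.ne_of_lt h, if_false, hne, Bool.false_eq_true]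

theorem pvMain (lines : List String) :
    ∀ (m i : Nat), lines.length - i = m → i ≤ lines.length →
    (∀ (ts : List PvATest),
      (((lines.drop i).foldl pvAParse (ts, none)).1).map pvProj
        = ts.map pvProj ++ pvTagB (pvOuterB lines i []))
    ∧ (∀ (ts : List PvATest) (t : PvATest), t.lines ≠ [] → t.desc.getD "" = pvDescAcc t.lines →
      (((lines.drop i).foldl pvAParse (ts, some t)).1).map pvProj
        = ts.map pvProj ++ pvQrhs lines i t.lines) := by
  intro m
  induction m with
  | zero =>
    intro i hm hi
    have hi' : i = lines.length := by omega
    subst hi'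
    constructor
    · intro ts
      rw [List.drop_length, pvOuterB]
      simp [pvTagB]
    · intro ts t ht hd
      rw [List.drop_length]
      unfold pvQrhs
      rw [pvScanB]
      simp
  | succ m ihm =>
    intro i hm hi
    have h : i < lines.length := by omega
    have hdrop : lines.drop i = lines[i] :: lines.drop (i + 1) := List.drop_eq_getElem_cons h
    have hgd : lines.getD i "" = lines[i] := List.getD_eq_getElem lines "" h
    obtain ⟨ihP, ihQ⟩ := ihm (i + 1) (by omega) (by omega)
    constructor
    · intro ts
      rw [hdrop, List.foldl_cons]
      by_cases hS : (PySem.Str.strip lines[i] == "TEST_START") = true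
      · have hstep : pvAParse (ts, none) lines[i] = (ts, some ⟨[lines[i]], none, none⟩) := by
          simp [pvAParse, hS]
        rw [hstep, ihQ ts ⟨[lines[i]], none, none⟩ (by simp) (by simp [pvDescAcc])]
        rw [pvL4 lines i h (by rw [hgd]; exact hS), hgd]
      · have hskip : pvOuterB lines i [] = pvOuterB lines (i + 1) [] := by
          rw [pvOuterB]
          have hb : (PySem.Str.strip (lines.getD i "") != "TEST_START") = true := by
            simp only [bne, hgd]
            simp [hS]
          simp [h, hb]
          intro hx
          exact absurd hx (by simpa using hS)
        have hstep : pvAParse (ts, none) lines[i] = (ts, none) := by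
          by_cases hE : (PySem.Str.strip lines[i] == "TEST_END") = true <;>
            simp [pvAParse, hS, hE]
        rw [hstep, ihP ts, hskip]
    · intro ts t ht hd
      rw [hdrop, List.foldl_cons]
      by_cases hS : (PySem.Str.strip lines[i] == "TEST_START") = true
      · have hstep : pvAParse (ts, some t) lines[i] = (ts, some ⟨[lines[i]], none, none⟩) := by
          simp [pvAParse, hS]
        rw [hstep, ihQ ts ⟨[lines[i]], none, none⟩ (by simp) (by simp [pvDescAcc])]
        rw [pvQrhs_start lines i t.lines h (by rw [hgd]; exact hS)]
        rw [pvL4 lines i h (by rw [hgd]; exact hS), hgd]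
      · by_cases hE : (PySem.Str.strip lines[i] == "TEST_END") = true
        · have hstep : pvAParse (ts, some t) lines[i]
              = (ts ++ [{ t with lines := t.lines ++ [lines[i]] }], none) := by
            simp [pvAParse, hS, hE]
          rw [hstep, ihP]
          have hrhs : pvQrhs lines i t.lines
              = (t.lines ++ [lines[i]], pvDescAcc t.lines) :: pvTagB (pvOuterB lines (i + 1) []) := by
            unfold pvQrhs
            rw [pvScanB_marker lines i (by rw [Bool.or_eq_true, hgd]; exact Or.inr hE)]
            simp only [Nat.ne_of_lt h, if_false, hgd, hE, if_true]
            simp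
          rw [hrhs]
          simp [pvProj, hd]
        · have hmk : (PySem.Str.strip (lines.getD i "") == "TEST_START"
              || PySem.Str.strip (lines.getD i "") == "TEST_END") = false := by
            rw [hgd]; simp [hS, hE]
          have hquot : pvQrhs lines i t.lines = pvQrhs lines (i + 1) (t.lines ++ [lines[i]]) := by
            rw [pvQrhs_step lines i t.lines h hmk, hgd]
          by_cases hD : (PySem.Str.startswith lines[i] "Description:") = true
          · try simp at hD
            have hstep : pvAParse (ts, some t) lines[i]
                = (ts, some ⟨t.lines ++ [lines[i]], some lines[i], t.params⟩) := by
              simp [pvAParse, hS, hE, hD]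
            rw [hstep, ihQ ts _ (by simp [ht]) ?_, hquot]
            simp only [Option.getD_some]
            rw [pvDescAcc_append t.lines ht lines[i]]
            simp [pvIsDesc, hD]
          · try simp at hD
            have hinv : t.desc.getD "" = pvDescAcc (t.lines ++ [lines[i]]) := by
              rw [pvDescAcc_append t.lines ht lines[i]]
              simp [pvIsDesc, hD, hd]
            by_cases hP : (PySem.Str.isIn "PARAMS:" lines[i]) = true
            · try simp at hP
              have hstep : pvAParse (ts, some t) lines[i]
                  = (ts, some ⟨t.lines ++ [lines[i]], t.desc, some lines[i]⟩) := by
                simp [pvAParse, hS, hE, hD, hP]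
              rw [hstep, ihQ ts _ (by simp [ht]) hinv, hquot]
            · try simp at hP
              have hstep : pvAParse (ts, some t) lines[i]
                  = (ts, some ⟨t.lines ++ [lines[i]], t.desc, t.params⟩) := by
                simp [pvAParse, hS, hE, hD, hP]
              rw [hstep, ihQ ts _ (by simp [ht]) hinv, hquot]

-- slice? only reads elements by index, so it commutes with map
theorem pv_slice?_map {α β : Type} (f : α → β) (xs : List α) (a b : Option Int) (st : Int) :
    PySem.List.slice? (xs.map f) a b st = (PySem.List.slice? xs a b st).map (List.map f) := by
  unfold PySem.List.slice?
  by_cases h : st = 0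
  · simp [h]
  · simp only [h, List.length_map]
    cases PySem.List.sliceIndices xs.length a b st with
    | mk s rest =>
      cases rest with
      | mk e stp =>
        simp [List.map_filterMap, List.getElem?_map]

-- map commutes with the prefix slices
theorem pv_slice_take_map {α β : Type} (f : α → β) (xs : List α) (k : Nat) :
    PySem.List.slice (xs.map f) none (some (k : Int)) = (PySem.List.slice xs none (some (k : Int))).map f := by
  rw [PySem.List.slice_to_natCast, PySem.List.slice_to_natCast, List.map_take]

theorem pv_slice_take_map_int {α β : Type} (f : α → β) (xs : List α) (k : Int) (hk : 0 ≤ k) :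
    PySem.List.slice (xs.map f) none (some k) = (PySem.List.slice xs none (some k)).map f := by
  rw [PySem.List.slice_to _ hk, PySem.List.slice_to _ hk, List.map_take]

-- A's categorization loop, as four filters
theorem pvCat4 (tests : List PvATest) :
    ∀ (e b s r : List PvATest),
    tests.foldl pvACat (e, b, s, r)
      = (e ++ tests.filter (fun t => pvErrorWords.any (fun w => PySem.Str.isIn w (PySem.Str.lower (t.desc.getD "")))),
         b ++ tests.filter (fun t => !(pvErrorWords.any (fun w => PySem.Str.isIn w (PySem.Str.lower (t.desc.getD ""))))
            && pvBoundaryWords.any (fun w => PySem.Str.isIn w (PySem.Str.lower (t.desc.getD "")))),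
         s ++ tests.filter (fun t => !(pvErrorWords.any (fun w => PySem.Str.isIn w (PySem.Str.lower (t.desc.getD ""))))
            && !(pvBoundaryWords.any (fun w => PySem.Str.isIn w (PySem.Str.lower (t.desc.getD ""))))
            && pvSpecialWords.any (fun w => PySem.Str.isIn w (PySem.Str.lower (t.desc.getD "")))),
         r ++ tests.filter (fun t => !(pvErrorWords.any (fun w => PySem.Str.isIn w (PySem.Str.lower (t.desc.getD ""))))
            && !(pvBoundaryWords.any (fun w => PySem.Str.isIn w (PySem.Str.lower (t.desc.getD ""))))
            && !(pvSpecialWords.any (fun w => PySem.Str.isIn w (PySem.Str.lower (t.desc.getD "")))))) := by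
  induction tests with
  | nil => intro e b s r; simp
  | cons t ts ih =>
    intro e b s r
    rw [List.foldl_cons]
    by_cases h0 : (pvErrorWords.any (fun w => PySem.Str.isIn w (PySem.Str.lower (t.desc.getD "")))) = true
    · simp only [pvACat, h0, if_true, List.filter_cons, Bool.not_true, Bool.false_and, Bool.false_eq_true, if_false, ih]
      simp
    · rw [Bool.not_eq_true] at h0
      by_cases h1 : (pvBoundaryWords.any (fun w => PySem.Str.isIn w (PySem.Str.lower (t.desc.getD "")))) = true
      · simp only [pvACat, h0, h1, Bool.false_eq_true, if_false, if_true, List.filter_cons,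
          Bool.not_false, Bool.true_and, Bool.not_true, Bool.and_false, Bool.false_and, ih]
        simp
      · rw [Bool.not_eq_true] at h1
        by_cases h2 : (pvSpecialWords.any (fun w => PySem.Str.isIn w (PySem.Str.lower (t.desc.getD "")))) = true
        · simp only [pvACat, h0, h1, h2, Bool.false_eq_true, if_false, if_true, List.filter_cons,
            Bool.not_false, Bool.true_and, Bool.and_false, Bool.and_true, Bool.and_self, ih]
          simp
        · rw [Bool.not_eq_true] at h2
          simp only [pvACat, h0, h1, h2, Bool.false_eq_true, if_false, List.filter_cons,
            Bool.not_false, Bool.true_and, Bool.and_false, Bool.and_self, ih]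
          simp

-- transfer a description-based filter from A's tests to B's blocks
theorem pvFilterTransfer (p : String → Bool) :
    ∀ (tests : List PvATest) (blocks : List (List String)),
    tests.map pvProj = pvTagB blocks →
    (tests.filter (fun t => p (t.desc.getD ""))).map (·.lines)
      = blocks.filter (fun b => p (pvDescB b)) := by
  intro tests
  induction tests with
  | nil =>
    intro blocks hmap
    cases blocks with
    | nil => simp
    | cons b bs => simp [pvTagB] at hmap
  | cons t ts ih =>
    intro blocks hmap
    cases blocks with
    | nil => simp [pvTagB] at hmap
    | cons b bs =>
      simp only [pvTagB, List.map_cons] at hmap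
      obtain ⟨hpair, hrest⟩ := List.cons.injEq .. ▸ hmap
      have hl : t.lines = b := congrArg Prod.fst hpair
      have hdsc : t.desc.getD "" = pvDescB b := congrArg Prod.snd hpair
      by_cases hp : p (t.desc.getD "") = true
      · rw [show List.filter (fun t => p (t.desc.getD "")) (t :: ts)
              = t :: List.filter (fun t => p (t.desc.getD "")) ts from List.filter_cons_of_pos hp,
            show List.filter (fun b => p (pvDescB b)) (b :: bs)
              = b :: List.filter (fun b => p (pvDescB b)) bs from
              List.filter_cons_of_pos (by rw [← hdsc]; exact hp)]
        simp only [List.map_cons, hl]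
        rw [ih bs hrest]
      · rw [show List.filter (fun t => p (t.desc.getD "")) (t :: ts)
              = List.filter (fun t => p (t.desc.getD "")) ts from
              List.filter_cons_of_neg (by simpa using hp),
            show List.filter (fun b => p (pvDescB b)) (b :: bs)
              = List.filter (fun b => p (pvDescB b)) bs from
              List.filter_cons_of_neg (by rw [← hdsc]; simpa using hp)]
        exact ih bs hrest

-- B's bucket comprehensions, as plain filters over the blocks
theorem pvBucketFilter (blocks : List (List String)) (k : Int) :
    ((blocks.map (fun b => (pvCategory b, b))).filter (fun cb => cb.1 == k)).map (·.2)
      = blocks.filter (fun b => pvCategory b == k) := by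
  rw [List.filter_map]
  rw [List.map_map]
  simp [Function.comp_def]

-- the category number agrees with A's keyword chain on the same description
theorem pvCatSpec (b : List String) :
    ((pvCategory b == 0)
        = pvErrorWords.any (fun w => PySem.Str.isIn w (PySem.Str.lower (pvDescB b))))
    ∧ ((pvCategory b == 1)
        = (!(pvErrorWords.any (fun w => PySem.Str.isIn w (PySem.Str.lower (pvDescB b))))
           && pvBoundaryWords.any (fun w => PySem.Str.isIn w (PySem.Str.lower (pvDescB b)))))
    ∧ ((pvCategory b == 2)
        = (!(pvErrorWords.any (fun w => PySem.Str.isIn w (PySem.Str.lower (pvDescB b))))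
           && !(pvBoundaryWords.any (fun w => PySem.Str.isIn w (PySem.Str.lower (pvDescB b))))
           && pvSpecialWords.any (fun w => PySem.Str.isIn w (PySem.Str.lower (pvDescB b)))))
    ∧ ((pvCategory b == 3)
        = (!(pvErrorWords.any (fun w => PySem.Str.isIn w (PySem.Str.lower (pvDescB b))))
           && !(pvBoundaryWords.any (fun w => PySem.Str.isIn w (PySem.Str.lower (pvDescB b))))
           && !(pvSpecialWords.any (fun w => PySem.Str.isIn w (PySem.Str.lower (pvDescB b)))))) := by
  simp only [pvCategory]
  have hdb : ((PySem.List.slice b (some 1) (some (-1))).reverse.find?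
      (fun l => PySem.Str.startswith l "Description:")).getD "" = pvDescB b := rfl
  rw [hdb]
  generalize (pvErrorWords.any (fun w => PySem.Str.isIn w (PySem.Str.lower (pvDescB b)))) = x0
  generalize (pvBoundaryWords.any (fun w => PySem.Str.isIn w (PySem.Str.lower (pvDescB b)))) = x1
  generalize (pvSpecialWords.any (fun w => PySem.Str.isIn w (PySem.Str.lower (pvDescB b)))) = x2
  cases x0 <;> cases x1 <;> cases x2 <;> simp

theorem pvBody (l : List PvATest) :
    ∀ (init : List String),
    l.foldl (fun acc t => acc ++ t.lines ++ [""]) init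
      = init ++ (l.map (·.lines)).flatMap (fun b => b ++ [""]) := by
  induction l with
  | nil => intro init; simp
  | cons t ts ih =>
    intro init
    rw [List.foldl_cons, ih]
    simp [List.append_assoc]

-- ===== VERDICT (by name: the statement is the Claim_ definition above) =====
theorem compress_test_cases_spec : Claim_equal_compress_test_cases := by
  intro tc mt _ _
  unfold Spec_compress_test_cases compress_test_cases compress_test_cases_alt
  dsimp only
  set lines := PySem.Str.splitlines tc with hlines
  set tests := ((lines.foldl pvAParse ([], none)).1) with htests
  set blocks := pvOuterB lines 0 [] with hblocks
  have hmap : tests.map pvProj = pvTagB blocks := by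
    have := ((pvMain lines lines.length 0 (by omega) (by omega)).1) []
    simpa using this
  have hlen : tests.length = blocks.length := by
    have h1 := congrArg List.length hmap
    simpa [pvTagB] using h1
  set c := tests.foldl pvACat ([], [], [], []) with hc
  have hc4 := pvCat4 tests [] [] [] []
  rw [← hc] at hc4
  -- the four buckets correspond under map (·.lines)
  have hE : c.1.map (·.lines)
      = ((blocks.map (fun b => (pvCategory b, b))).filter (fun cb => cb.1 == 0)).map (·.2) := by
    rw [pvBucketFilter blocks 0]
    have h1 : c.1 = tests.filter (fun t => pvErrorWords.any (fun w => PySem.Str.isIn w (PySem.Str.lower (t.desc.getD "")))) := by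
      rw [hc4]
      simp
    rw [h1]
    exact (pvFilterTransfer (fun d => pvErrorWords.any (fun w => PySem.Str.isIn w (PySem.Str.lower d))) tests blocks hmap).trans
      (List.filter_congr (fun b _ => ((pvCatSpec b).1).symm))
  have hB : c.2.1.map (·.lines)
      = ((blocks.map (fun b => (pvCategory b, b))).filter (fun cb => cb.1 == 1)).map (·.2) := by
    rw [pvBucketFilter blocks 1]
    have h1 : c.2.1 = tests.filter (fun t => !(pvErrorWords.any (fun w => PySem.Str.isIn w (PySem.Str.lower (t.desc.getD ""))))
        && pvBoundaryWords.any (fun w => PySem.Str.isIn w (PySem.Str.lower (t.desc.getD "")))) := by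
      rw [hc4]
      simp
    rw [h1]
    exact (pvFilterTransfer (fun d => !(pvErrorWords.any (fun w => PySem.Str.isIn w (PySem.Str.lower d)))
        && pvBoundaryWords.any (fun w => PySem.Str.isIn w (PySem.Str.lower d))) tests blocks hmap).trans
      (List.filter_congr (fun b _ => ((pvCatSpec b).2.1).symm))
  have hS : c.2.2.1.map (·.lines)
      = ((blocks.map (fun b => (pvCategory b, b))).filter (fun cb => cb.1 == 2)).map (·.2) := by
    rw [pvBucketFilter blocks 2]
    have h1 : c.2.2.1 = tests.filter (fun t => !(pvErrorWords.any (fun w => PySem.Str.isIn w (PySem.Str.lower (t.desc.getD ""))))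
        && !(pvBoundaryWords.any (fun w => PySem.Str.isIn w (PySem.Str.lower (t.desc.getD ""))))
        && pvSpecialWords.any (fun w => PySem.Str.isIn w (PySem.Str.lower (t.desc.getD "")))) := by
      rw [hc4]
      simp
    rw [h1]
    exact (pvFilterTransfer (fun d => !(pvErrorWords.any (fun w => PySem.Str.isIn w (PySem.Str.lower d)))
        && !(pvBoundaryWords.any (fun w => PySem.Str.isIn w (PySem.Str.lower d)))
        && pvSpecialWords.any (fun w => PySem.Str.isIn w (PySem.Str.lower d))) tests blocks hmap).trans
      (List.filter_congr (fun b _ => ((pvCatSpec b).2.2.1).symm))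
  have hR : c.2.2.2.map (·.lines)
      = ((blocks.map (fun b => (pvCategory b, b))).filter (fun cb => cb.1 == 3)).map (·.2) := by
    rw [pvBucketFilter blocks 3]
    have h1 : c.2.2.2 = tests.filter (fun t => !(pvErrorWords.any (fun w => PySem.Str.isIn w (PySem.Str.lower (t.desc.getD ""))))
        && !(pvBoundaryWords.any (fun w => PySem.Str.isIn w (PySem.Str.lower (t.desc.getD ""))))
        && !(pvSpecialWords.any (fun w => PySem.Str.isIn w (PySem.Str.lower (t.desc.getD ""))))) := by
      rw [hc4]
      simp
    rw [h1]
    exact (pvFilterTransfer (fun d => !(pvErrorWords.any (fun w => PySem.Str.isIn w (PySem.Str.lower d)))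
        && !(pvBoundaryWords.any (fun w => PySem.Str.isIn w (PySem.Str.lower d)))
        && !(pvSpecialWords.any (fun w => PySem.Str.isIn w (PySem.Str.lower d)))) tests blocks hmap).trans
      (List.filter_congr (fun b _ => ((pvCatSpec b).2.2.2).symm))
  -- the compressed prefix lists correspond under map (·.lines)
  have hcomp : PySem.List.slice ((blocks.map (fun b => (pvCategory b, b))).filter (fun cb => cb.1 == 0) |>.map (·.2)) none (some 3)
      ++ PySem.List.slice ((blocks.map (fun b => (pvCategory b, b))).filter (fun cb => cb.1 == 1) |>.map (·.2)) none (some 4)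
      ++ PySem.List.slice ((blocks.map (fun b => (pvCategory b, b))).filter (fun cb => cb.1 == 2) |>.map (·.2)) none (some 3)
      = (PySem.List.slice c.1 none (some 3) ++ PySem.List.slice c.2.1 none (some 4) ++ PySem.List.slice c.2.2.1 none (some 3)).map (·.lines) := by
    rw [← hE, ← hB, ← hS]
    rw [show (3 : Int) = ((3 : Nat) : Int) by norm_num, show (4 : Int) = ((4 : Nat) : Int) by norm_num]
    rw [pv_slice_take_map, pv_slice_take_map, pv_slice_take_map]
    simp [List.map_append]
  rw [hcomp]
  set comp0 := PySem.List.slice c.1 none (some 3) ++ PySem.List.slice c.2.1 none (some 4) ++ PySem.List.slice c.2.2.1 none (some 3) with hcomp0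
  rw [List.length_map, ← hR]
  set rem : Int := mt - (comp0.length : Int) with hrem
  have hfill : (if rem > 0 ∧ c.2.2.2.map (·.lines) ≠ [] then
      comp0.map (·.lines) ++ PySem.List.slice ((PySem.List.slice? (c.2.2.2.map (·.lines)) none none (max 1 (PySem.Int.floordiv ((c.2.2.2.map (·.lines)).length : Int) rem))).getD []) none (some rem)
      else comp0.map (·.lines))
      = (if rem > 0 ∧ c.2.2.2 ≠ [] then
      comp0 ++ PySem.List.slice ((PySem.List.slice? c.2.2.2 none none (max 1 (PySem.Int.floordiv ((c.2.2.2.length : Int)) rem))).getD []) none (some rem)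
      else comp0).map (·.lines) := by
    by_cases hcond : rem > 0 ∧ c.2.2.2 ≠ []
    · have hcond' : rem > 0 ∧ c.2.2.2.map (·.lines) ≠ [] := ⟨hcond.1, by simpa using hcond.2⟩
      rw [if_pos hcond, if_pos hcond']
      rw [List.length_map, pv_slice?_map]
      cases hsl : PySem.List.slice? c.2.2.2 none none (max 1 (PySem.Int.floordiv ((c.2.2.2.length : Int)) rem)) with
      | none => simp [PySem.List.slice]
      | some ys =>
        simp only [Option.map_some, Option.getD_some]
        rw [pv_slice_take_map_int _ _ _ (le_of_lt hcond.1)]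
        simp [List.map_append]
    · have hcond' : ¬ (rem > 0 ∧ c.2.2.2.map (·.lines) ≠ []) := by
        intro hx
        exact hcond ⟨hx.1, by simpa using hx.2⟩
      rw [if_neg hcond, if_neg hcond']
  rw [hfill]
  set comp := (if rem > 0 ∧ c.2.2.2 ≠ [] then
      comp0 ++ PySem.List.slice ((PySem.List.slice? c.2.2.2 none none (max 1 (PySem.Int.floordiv ((c.2.2.2.length : Int)) rem))).getD []) none (some rem)
      else comp0) with hcompdef
  rw [pvBody]
  rw [← hlen]
  rw [← congrArg List.length hE, ← congrArg List.length hB, ← congrArg List.length hS]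
  simp only [List.length_map]
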